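-- pv_equiv track=rewrite | github.com/sk192/DB_Mgmt-project | dbCreateTable.py | string4_generate
-- ===== SOURCE A (Python) =====
-- def string4_generate(num):
--     d = []
--     n = num
--     x = ['A', 'H', 'O', 'V']
--     while num != 0:
--         for j in x:
--             if len(d) != n:
--                 d.append(j * 4 + 'x' * 45)
--                 num -= 1
--             else:
--                 break
--     return d
-- ===== SOURCE B (Python) =====
-- def string4_generate(num):
--     block = [l * 4 + 'x' * 45 for l in 'AHOV']
--     q, r = divmod(num, 4)
--     return block * q + block[:r]
-- ===== Notes on version B (the rewrite author's own statement) =====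
-- stated objective: simpler
-- what changed: Replaced A's nested while/for-with-break append loop by a loop-free closed form: divmod(num, 4) gives q whole copies of the 4-entry block (list repetition) plus a slice block[:r] for the remainder.
import Mathlib
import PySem

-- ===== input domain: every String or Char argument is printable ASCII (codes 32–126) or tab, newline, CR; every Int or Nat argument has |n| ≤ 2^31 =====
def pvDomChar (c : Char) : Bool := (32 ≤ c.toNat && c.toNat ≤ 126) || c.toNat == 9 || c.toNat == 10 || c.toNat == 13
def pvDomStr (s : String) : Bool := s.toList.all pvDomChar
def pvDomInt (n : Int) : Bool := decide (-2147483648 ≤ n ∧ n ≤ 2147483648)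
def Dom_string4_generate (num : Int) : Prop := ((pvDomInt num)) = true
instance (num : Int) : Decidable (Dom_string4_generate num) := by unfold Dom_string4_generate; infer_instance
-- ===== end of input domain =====

-- B replaces A's nested append loop by a loop-free closed form via divmod(num, 4):
-- q whole copies of the 4-entry block plus a slice block[:r] (objective: simpler).

-- ===== PORT A =====
-- Python's  j * 4 + 'x' * 45  (string repetition + concatenation), exact on the char-list level
def pvMkEntry (j : String) : String := String.ofList ((List.replicate 4 j.toList).flatten ++ List.replicate 45 'x')

-- A's inner 'for j in x: if len(d) != n: append; num -= 1 else: break'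
def pvForA (n : Int) : List String → List String → Int → List String × Int
  | [], d, num => (d, num)
  | j :: rest, d, num =>
      if (d.length : Int) ≠ n then pvForA n rest (d ++ [pvMkEntry j]) (num - 1)
      else (d, num)

-- A's outer 'while num != 0' loop; fuel = num.toNat suffices because each iteration with
-- num > 0 decreases num by at least 1 (for num < 0 the Python diverges, excluded by Pre_)
def pvWhileA (fuel : Nat) (n : Int) (d : List String) (num : Int) : List String :=
  match fuel with
  | 0 => d
  | f + 1 =>
      if num ≠ 0 then
        let p := pvForA n ["A", "H", "O", "V"] d num
        pvWhileA f n p.1 p.2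
      else d

def string4_generate (num : Int) : List String := pvWhileA num.toNat num [] num

-- ===== PORT B =====
-- B's  block = [l * 4 + 'x' * 45 for l in 'AHOV']  (iterating the string yields its chars)
def pvBlockB : List String := ['A', 'H', 'O', 'V'].map (fun l => pvMkEntry (String.ofList [l]))

-- B's  q, r = divmod(num, 4); return block * q + block[:r]
-- Python list repetition block * q is empty for q ≤ 0, else q concatenated copies: exact as
-- (List.replicate q.toNat block).flatten.  block[:r] is PySem.List.slice.
def string4_generate_alt (num : Int) : List String :=
  let q := PySem.Int.floordiv num 4
  let r := PySem.Int.mod num 4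
  (List.replicate q.toNat pvBlockB).flatten ++ PySem.List.slice pvBlockB none (some r)

-- ===== PRECONDITION & SPEC =====
-- Pre_ excludes num < 0, on which Python A loops forever and returns nothing.
def Pre_string4_generate (num : Int) : Prop := 0 ≤ num
instance (num : Int) : Decidable (Pre_string4_generate num) := by unfold Pre_string4_generate; infer_instance
def pvWitness_string4_generate : Int := (5)

def Spec_string4_generate (num : Int) (out : List String) : Prop := out = string4_generate_alt num
instance (num : Int) (out : List String) : Decidable (Spec_string4_generate num out) := by unfold Spec_string4_generate; infer_instance

-- ===== CLAIM (what is proved, stated in full; the proofs are below) =====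
def Claim_equal_string4_generate : Prop := ∀ (num : Int), Dom_string4_generate num → Pre_string4_generate num → Spec_string4_generate num (string4_generate num)

-- ===== LEMMAS AND PROOFS =====

-- the k-th produced string (proof-side characterisation)
def pvItem (k : Nat) : String := pvMkEntry (["A", "H", "O", "V"].getD (k % 4) "")

theorem pvItem_add4 (i : Nat) : pvItem (4 + i) = pvItem i := by
  simp [pvItem, Nat.add_mod_left]

theorem pvBlockB_eq : pvBlockB = (List.range 4).map pvItem := by decide

theorem pvBlocks_eq (q r : Nat) (hr : r < 4) :
    (List.replicate q pvBlockB).flatten ++ pvBlockB.take r =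
      (List.range (4 * q + r)).map pvItem := by
  induction q with
  | zero =>
      simp only [List.replicate, List.flatten_nil, List.nil_append, Nat.mul_zero, Nat.zero_add]
      interval_cases r <;> decide
  | succ q ih =>
      have h : 4 * (q + 1) + r = 4 + (4 * q + r) := by ring
      rw [h, List.range_add, List.map_append, List.map_map]
      have h2 : (List.range (4 * q + r)).map (pvItem ∘ (4 + ·)) =
          (List.range (4 * q + r)).map pvItem := by
        apply List.map_congr_left; intro i _; exact pvItem_add4 i
      rw [h2, ← ih, ← pvBlockB_eq]
      simp [List.replicate_succ, List.flatten_cons, List.append_assoc]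

theorem pvWhileA_zero (f : Nat) (n : Int) (d : List String) : pvWhileA f n d 0 = d := by
  cases f <;> simp [pvWhileA]

theorem pvForA_big (d : List String) (num : Int) (h4 : 4 ≤ num) (hL : d.length % 4 = 0) :
    pvForA ((d.length : Int) + num) ["A", "H", "O", "V"] d num =
      (d ++ [pvItem d.length, pvItem (d.length + 1), pvItem (d.length + 2), pvItem (d.length + 3)],
       num - 4) := by
  have e0 : d.length % 4 = 0 := hL
  have e1 : (d.length + 1) % 4 = 1 := by omega
  have e2 : (d.length + 2) % 4 = 2 := by omega
  have e3 : (d.length + 3) % 4 = 3 := by omega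
  simp only [pvForA, List.length_append, List.length_cons, List.length_nil]
  rw [if_pos (by omega), if_pos (by simp; try omega),
      if_pos (by simp; try omega), if_pos (by simp; try omega)]
  simp [pvItem, e0, e1, e2, e3]
  omega

theorem pvForA_small (d : List String) (num : Int) (h1 : 1 ≤ num) (h4 : num < 4)
    (hL : d.length % 4 = 0) :
    pvForA ((d.length : Int) + num) ["A", "H", "O", "V"] d num =
      (d ++ (List.range num.toNat).map (fun i => pvItem (d.length + i)), 0) := by
  have e0 : d.length % 4 = 0 := hL
  have e1 : (d.length + 1) % 4 = 1 := by omega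
  have e2 : (d.length + 2) % 4 = 2 := by omega
  interval_cases num
  · simp only [pvForA, List.length_append, List.length_cons, List.length_nil]
    rw [if_pos (by omega), if_neg (by simp; try omega)]
    simp [pvItem, e0, List.range_succ]
  · simp only [pvForA, List.length_append, List.length_cons, List.length_nil]
    rw [if_pos (by omega), if_pos (by simp; try omega),
        if_neg (by simp; try omega)]
    simp [pvItem, e0, e1, List.range_succ]
  · simp only [pvForA, List.length_append, List.length_cons, List.length_nil]
    rw [if_pos (by omega), if_pos (by simp; try omega),
        if_pos (by simp; try omega), if_neg (by simp; try omega)]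
    simp [pvItem, e0, e1, e2, List.range_succ]

theorem pvWhileA_eq (f : Nat) : ∀ (d : List String) (num : Int),
    0 ≤ num → num.toNat ≤ f → d.length % 4 = 0 →
    pvWhileA f ((d.length : Int) + num) d num =
      d ++ (List.range num.toNat).map (fun i => pvItem (d.length + i)) := by
  induction f with
  | zero =>
      intro d num h0 hf _
      have : num = 0 := by omega
      subst this; simp [pvWhileA]
  | succ f ih =>
      intro d num h0 hf hL
      by_cases hz : num = 0
      · subst hz; simp [pvWhileA]
      · rw [pvWhileA, if_pos hz]
        by_cases h4 : 4 ≤ num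
        · rw [pvForA_big d num h4 hL]
          have hlen : ((d ++ [pvItem d.length, pvItem (d.length + 1), pvItem (d.length + 2),
              pvItem (d.length + 3)]).length : Int) = (d.length : Int) + 4 := by
            simp
          have := ih (d ++ [pvItem d.length, pvItem (d.length + 1), pvItem (d.length + 2),
              pvItem (d.length + 3)]) (num - 4) (by omega) (by omega) (by simp; omega)
          simp only [hlen] at this ⊢
          have harg : (d.length : Int) + 4 + (num - 4) = (d.length : Int) + num := by ring
          rw [harg] at this
          rw [this]
          have hsplit : num.toNat = 4 + (num - 4).toNat := by omega
          rw [hsplit, List.range_add, List.map_append, List.map_map]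
          simp only [List.length_append, List.length_cons, List.length_nil]
          simp [List.range_succ, Function.comp, List.append_assoc]
          intro a _; congr 1; omega
        · have h1 : 1 ≤ num := by omega
          rw [pvForA_small d num h1 (by omega) hL]
          simp only [pvWhileA_zero]

theorem string4_generate_eq (num : Int) (h : 0 ≤ num) :
    string4_generate num = (List.range num.toNat).map pvItem := by
  have := pvWhileA_eq num.toNat [] num h (le_refl _) (by simp)
  have h2 : ((List.length ([] : List String) : Int)) + num = num := by simp
  rw [h2] at this
  show pvWhileA num.toNat num [] num = _
  rw [this]
  simp

theorem string4_generate_alt_eq (num : Int) (h : 0 ≤ num) :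
    string4_generate_alt num = (List.range num.toNat).map pvItem := by
  have hn : num = ((num.toNat : Nat) : Int) := by omega
  show (List.replicate (PySem.Int.floordiv num 4).toNat pvBlockB).flatten ++
      PySem.List.slice pvBlockB none (some (PySem.Int.mod num 4)) = _
  have hq : PySem.Int.floordiv num 4 = ((num.toNat / 4 : Nat) : Int) := by
    rw [hn]; exact_mod_cast PySem.Int.floordiv_natCast num.toNat 4
  have hr : PySem.Int.mod num 4 = ((num.toNat % 4 : Nat) : Int) := by
    rw [hn]; exact_mod_cast PySem.Int.mod_natCast num.toNat 4
  rw [hq, hr, PySem.List.slice_to_natCast, Int.toNat_natCast]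
  have hd : num.toNat = 4 * (num.toNat / 4) + num.toNat % 4 := by omega
  rw [pvBlocks_eq (num.toNat / 4) (num.toNat % 4) (by omega), ← hd]

-- ===== VERDICT (by name: the statement is the Claim_ definition above) =====
theorem string4_generate_spec : Claim_equal_string4_generate := by
  intro num _ hpre
  unfold Spec_string4_generate
  rw [string4_generate_eq num hpre, string4_generate_alt_eq num hpre]
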